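-- pv_equiv track=rewrite | github.com/LuisPerez64/Prac | python/coding_challenges/leet_code/expressive_words.py | pulled_implementation
-- ===== SOURCE A (Python) =====
-- from typing import List
--
-- def pulled_implementation(S: str, words: List[str]) -> int:
--     count = 0
--     for word in words:
--         i = 0
--         j = 0
--         match = False
--         while i < len(S) and j < len(word):
--             sCharCount = 0
--             sChar = S[i]
--             while i < len(S) and S[i] == sChar:
--                 sCharCount += 1
--                 i += 1
--             wCharCount = 0
--             match = False
--             while j < len(word) and sChar == word[j]:
--                 j += 1
--                 wCharCount += 1
--             if sCharCount < 3 and sCharCount == wCharCount: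
--                 match = True
--                 continue
--             elif sCharCount > 2 and sCharCount >= wCharCount:
--                 match = True
--                 continue
--             else:
--                 match = False
--                 break
--         if match and i == len(S) and j == len(word):
--             count += 1
--     return count
-- ===== SOURCE B (Python) =====
-- from typing import List
--
-- def _groups(s):
--     gs = []
--     for ch in s:
--         if gs and gs[-1][0] == ch:
--             gs[-1][1] += 1
--         else:
--             gs.append([ch, 1])
--     return gs
--
-- def pulled_implementation(S: str, words: List[str]) -> int:
--     sg = _groups(S)
--
--     def stretchy(word):
--         wg = _groups(word)
--         if not sg or not wg:
--             return False
--         j = 0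
--         for c, sc in sg:
--             if j == len(wg):
--                 return False
--             if wg[j][0] == c:
--                 wc = wg[j][1]
--                 if not (sc == wc or (sc >= 3 and sc >= wc)):
--                     return False
--                 j += 1
--             elif sc >= 3:
--                 continue
--             else:
--                 return False
--         return j == len(wg)
--
--     return sum(1 for w in words if stretchy(w))
-- ===== Notes on version B (the rewrite author's own statement) =====
-- stated objective: faster
-- what changed: B run-length-encodes S once and each word once, then decides each word by a single walk over the two (char, count) group lists, instead of A's per-word two-pointer character re-scan of S with inner run-counting while-loops; B reproduces A's exact matching rule, including that an S-run of length >= 3 with no matching word characters is skipped while word characters remain.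
import Mathlib
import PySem

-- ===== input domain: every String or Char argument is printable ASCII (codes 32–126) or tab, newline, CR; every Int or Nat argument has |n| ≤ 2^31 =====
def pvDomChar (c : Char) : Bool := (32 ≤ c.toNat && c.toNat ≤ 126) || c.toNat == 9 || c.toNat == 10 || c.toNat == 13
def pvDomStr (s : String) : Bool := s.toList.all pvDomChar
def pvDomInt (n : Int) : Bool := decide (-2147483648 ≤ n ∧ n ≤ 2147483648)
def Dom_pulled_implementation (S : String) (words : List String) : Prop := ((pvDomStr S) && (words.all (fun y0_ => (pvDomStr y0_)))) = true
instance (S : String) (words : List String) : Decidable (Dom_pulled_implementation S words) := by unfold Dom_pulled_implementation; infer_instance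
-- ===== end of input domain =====

-- B compresses S into (char, run-length) groups once and checks each word by one walk
-- over the two group lists instead of A's per-word two-pointer re-scan of S (measured faster); B reproduces
-- A's behaviour exactly, including A's rule that a run of ≥3 in S absent from the word
-- may be skipped while word characters remain.

-- ===== PORT A =====
-- inner `while … and S[i]==sChar` / `while … and sChar==word[j]`: length of the leading
-- run of c in the remaining suffix
def runA (c : Char) : List Char → Nat
  | [] => 0
  | x :: xs => if x = c then runA c xs + 1 else 0

-- A's outer `while i < len(S) and j < len(word)` loop, on the suffixes at i and j;
-- returns (match, remaining S suffix, remaining word suffix)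
def loopA : List Char → List Char → Bool → Bool × List Char × List Char
  | [], w, m => (m, [], w)
  | x :: s', [], m => (m, x :: s', [])
  | x :: s', y :: w', _ =>
    let sCnt := 1 + runA x s'
    let sRest := s'.drop (runA x s')
    let wCnt := runA x (y :: w')
    let wRest := (y :: w').drop wCnt
    if sCnt < 3 ∧ sCnt = wCnt then loopA sRest wRest true
    else if 2 < sCnt ∧ wCnt ≤ sCnt then loopA sRest wRest true
    else (false, sRest, wRest)
termination_by s _ _ => s.length
decreasing_by all_goals simp

-- `if match and i == len(S) and j == len(word)`
def okA (S word : String) : Bool :=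
  let r := loopA S.toList word.toList false
  r.1 && r.2.1.isEmpty && r.2.2.isEmpty

def pulled_implementation (S : String) (words : List String) : Int :=
  words.foldl (fun count word => if okA S word then count + 1 else count) 0

-- ===== PORT B =====
-- Source B's _groups: run-length encoding (Source B extends the last group left-to-right;
-- this structural recursion builds the same list)
def pvGroups : List Char → List (Char × Nat)
  | [] => []
  | c :: cs =>
    match pvGroups cs with
    | [] => [(c, 1)]
    | (d, n) :: rest => if d = c then (c, n + 1) :: rest else (c, 1) :: (d, n) :: rest

-- Source B's `for c, sc in sg` walk carrying pointer j into wg (here: the remaining wg list)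
def pvWalk : List (Char × Nat) → List (Char × Nat) → Bool
  | [], wg => wg.isEmpty
  | (_, _) :: _, [] => false
  | (c, sc) :: rest, (d, wc) :: wrest =>
    if d = c then
      if sc = wc ∨ (3 ≤ sc ∧ wc ≤ sc) then pvWalk rest wrest else false
    else if 3 ≤ sc then pvWalk rest ((d, wc) :: wrest)
    else false

def pvStretchy (sg : List (Char × Nat)) (word : String) : Bool :=
  let wg := pvGroups word.toList
  !sg.isEmpty && !wg.isEmpty && pvWalk sg wg

def pulled_implementation_alt (S : String) (words : List String) : Int :=
  let sg := pvGroups S.toList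
  ((words.filter (fun w => pvStretchy sg w)).length : Int)

-- ===== PRECONDITION & SPEC =====
def Spec_pulled_implementation (S : String) (words : List String) (out : Int) : Prop := out = pulled_implementation_alt S words
instance (S : String) (words : List String) (out : Int) : Decidable (Spec_pulled_implementation S words out) := by unfold Spec_pulled_implementation; infer_instance

-- ===== CLAIM (what is proved, stated in full; the proofs are below) =====
def Claim_equal_pulled_implementation : Prop := ∀ (S : String) (words : List String), Dom_pulled_implementation S words → Spec_pulled_implementation S words (pulled_implementation S words)

-- ===== LEMMAS AND PROOFS =====

-- success test applied to loopA's result triple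
def pvSucc (t : Bool × List Char × List Char) : Bool :=
  t.1 && t.2.1.isEmpty && t.2.2.isEmpty

theorem groups_cons : ∀ (t : List Char) (x : Char),
    pvGroups (x :: t) = (x, 1 + runA x t) :: pvGroups (t.drop (runA x t)) := by
  intro t
  induction t with
  | nil => intro x; simp [pvGroups, runA]
  | cons y t' ih =>
    intro x
    by_cases h : y = x
    · subst h
      have hr : runA y (y :: t') = runA y t' + 1 := by simp [runA]
      rw [show pvGroups (y :: y :: t') = (match pvGroups (y :: t') with
            | [] => [(y, 1)]
            | (d, n) :: rest => if d = y then (y, n + 1) :: rest else (y, 1) :: (d, n) :: rest)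
          from rfl]
      rw [ih y, hr, List.drop_succ_cons]
      simp
      omega
    · have hr : runA x (y :: t') = 0 := by simp [runA, h]
      rw [show pvGroups (x :: y :: t') = (match pvGroups (y :: t') with
            | [] => [(x, 1)]
            | (d, n) :: rest => if d = x then (x, n + 1) :: rest else (x, 1) :: (d, n) :: rest)
          from rfl]
      rw [ih y, hr, List.drop_zero]
      simp [h]
      rw [← ih y]

theorem succ_walk : ∀ (n : Nat) (s w : List Char), s.length ≤ n →
    pvSucc (loopA s w true) = pvWalk (pvGroups s) (pvGroups w) := by
  intro n
  induction n with
  | zero =>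
    intro s w hn
    have hs : s = [] := by cases s <;> simp_all
    subst hs
    cases w with
    | nil => simp [loopA, pvSucc, pvWalk, pvGroups]
    | cons y w' =>
      rw [groups_cons]
      simp [loopA, pvSucc, pvWalk, pvGroups]
  | succ n ih =>
    intro s w hn
    cases s with
    | nil =>
      cases w with
      | nil => simp [loopA, pvSucc, pvWalk, pvGroups]
      | cons y w' =>
        rw [groups_cons]
        simp [loopA, pvSucc, pvWalk, pvGroups]
    | cons x s' =>
      cases w with
      | nil =>
        rw [groups_cons]
        simp [loopA, pvSucc, pvGroups, pvWalk]
      | cons y w' =>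
        rw [groups_cons, groups_cons]
        have hlen : (s'.drop (runA x s')).length ≤ n := by
          have h1 : (s'.drop (runA x s')).length ≤ s'.length := by
            rw [List.length_drop]; omega
          simp at hn
          omega
        by_cases hy : y = x
        · subst hy
          have hr : runA y (y :: w') = runA y w' + 1 := by simp [runA]
          rw [loopA, pvWalk]
          simp only [hr, List.drop_succ_cons]
          have hrec := ih (s'.drop (runA y s')) (w'.drop (runA y w')) hlen
          split_ifs with c1 c2 c3 <;> try (first | exact hrec | simp [pvSucc]) <;> omega
        · have hr : runA x (y :: w') = 0 := by simp [runA, hy]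
          rw [loopA, pvWalk]
          simp only [hr, if_neg hy, List.drop_zero]
          have hrec := ih (s'.drop (runA x s')) (y :: w') (by
            have h1 : (s'.drop (runA x s')).length ≤ s'.length := by
              rw [List.length_drop]; omega
            simp at hn; omega)
          rw [groups_cons] at hrec
          split_ifs with c1 c2 c3 <;> try (first | exact hrec | simp [pvSucc]) <;> omega

theorem loopA_false_true (x : Char) (s' : List Char) (y : Char) (w' : List Char) :
    loopA (x :: s') (y :: w') false = loopA (x :: s') (y :: w') true := by
  rw [loopA, loopA]

theorem okA_succ (S word : String) :
    okA S word = pvSucc (loopA S.toList word.toList false) := rfl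

theorem okA_eq (S word : String) : okA S word = pvStretchy (pvGroups S.toList) word := by
  rw [okA_succ]
  unfold pvStretchy
  cases hs : S.toList with
  | nil => simp [loopA, pvSucc, pvGroups]
  | cons x s' =>
    cases hw : word.toList with
    | nil => rw [groups_cons]; simp [loopA, pvSucc, pvGroups]
    | cons y w' =>
      rw [loopA_false_true, succ_walk (x :: s').length _ _ le_rfl]
      rw [groups_cons, groups_cons]
      simp

theorem fold_count : ∀ (ws : List String) (p : String → Bool) (n : Int),
    ws.foldl (fun c w => if p w then c + 1 else c) n = n + ((ws.filter p).length : Int) := by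
  intro ws
  induction ws with
  | nil => intro p n; simp
  | cons w ws ih =>
    intro p n
    by_cases h : p w
    · simp [List.foldl, List.filter, h, ih]; ring
    · simp [List.foldl, List.filter, h, ih]

-- ===== VERDICT (by name: the statement is the Claim_ definition above) =====
theorem pulled_implementation_spec : Claim_equal_pulled_implementation := by
  intro S words _
  unfold Spec_pulled_implementation pulled_implementation pulled_implementation_alt
  have hp : (fun w => okA S w) = (fun w => pvStretchy (pvGroups S.toList) w) := by
    funext w; exact okA_eq S w
  rw [show (fun (count : Int) word => if okA S word then count + 1 else count)
      = (fun (count : Int) word => if pvStretchy (pvGroups S.toList) word then count + 1 else count)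
      from by funext c w; rw [okA_eq]]
  rw [fold_count]
  simp
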